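-- pv_equiv track=rewrite | github.com/epoyraz/leetcode | solutions/3561.py | maxGoodNumber
-- ===== SOURCE A (Python) =====
-- import itertools
--
-- def maxGoodNumber(nums):
--     """
--     :type nums: List[int]
--     :rtype: int
--     """
--     max_val = 0
--     # Try all permutations of the three numbers
--     for perm in itertools.permutations(nums):
--         # Concatenate binary representations without leading zeros
--         s = ''.join(bin(x)[2:] for x in perm)
--         # Convert concatenated binary string to integer
--         val = int(s, 2)
--         if val > max_val:
--             max_val = val
--     return max_val
-- ===== SOURCE B (Python) =====
-- def maxGoodNumber(nums):
--     """
--     :type nums: List[int]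
--     :rtype: int
--     """
--     def best(lst):
--         # returns (max concatenation value over orderings of lst, total bit width)
--         if not lst:
--             return (0, 0)
--         res = None
--         for i, x in enumerate(lst):
--             sub_v, sub_b = best(lst[:i] + lst[i + 1:])
--             w = x.bit_length() or 1
--             cand = ((x << sub_b) + sub_v, sub_b + w)
--             if res is None or cand[0] > res[0]:
--                 res = cand
--         return res
--     return best(nums)[0]
-- ===== Notes on version B (the rewrite author's own statement) =====
-- stated objective: alternative
-- what changed: A joins binary strings for every whole permutation and parses each with int(s,2); B never builds strings: it recursively picks each possible leading element and combines it arithmetically (shift by the rest's total bit width) with the best arrangement of the rest.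
import Mathlib
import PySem

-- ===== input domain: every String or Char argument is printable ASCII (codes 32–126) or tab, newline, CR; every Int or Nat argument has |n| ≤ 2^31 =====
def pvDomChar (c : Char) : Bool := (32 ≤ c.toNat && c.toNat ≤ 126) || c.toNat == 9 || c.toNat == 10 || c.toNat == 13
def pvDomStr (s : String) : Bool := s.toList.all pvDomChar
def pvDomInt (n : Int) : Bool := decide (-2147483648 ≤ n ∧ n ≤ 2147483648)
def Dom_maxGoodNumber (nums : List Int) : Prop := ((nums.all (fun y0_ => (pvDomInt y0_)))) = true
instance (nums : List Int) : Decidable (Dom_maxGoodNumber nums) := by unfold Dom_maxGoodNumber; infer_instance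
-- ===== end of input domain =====

-- B replaces A's enumeration of all whole permutations by a recursion that picks each
-- possible first element and reuses the best arrangement of the rest (objective: alternative).

-- ===== PORT A =====
-- hand port of int(s, 2) for the strings A builds (joins of bin(x)[2:] outputs):
-- exact there — such a string parses iff it is nonempty and all '0'/'1' (a 'b' from a
-- negative x, or the empty join, is Python's ValueError = none).
def pvParse2? (s : List Char) : Option Int :=
  if s ≠ [] ∧ s.all (fun c => c == '0' || c == '1') then
    some (s.foldl (fun a c => 2 * a + (if c == '1' then 1 else 0)) 0)
  else none

def maxGoodNumber (nums : List Int) : Int :=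
  (PySem.List.permutations nums nums.length).foldl
    (fun max_val perm =>
      let s := perm.flatMap (fun x => (PySem.Int.toBinChars0b x).drop 2)  -- ''.join(bin(x)[2:])
      let val := (pvParse2? s).getD 0                                     -- int(s, 2); none excluded by Pre_
      if val > max_val then val else max_val) 0

-- ===== PORT B =====
-- pvBest fuel lst = Source B's best(lst); fuel = lst.length makes the recursion structural
-- (the 0/cons fuel case is unreachable).
def pvBest : Nat → List Int → Int × Nat
  | _, [] => (0, 0)
  | 0, _ :: _ => (0, 0)
  | fuel + 1, x0 :: xs =>
    (((x0 :: xs).zipIdx.foldl (fun (res : Option (Int × Nat)) (xi : Int × Nat) =>                 -- for i, x in enumerate(lst)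
        let sub := pvBest fuel ((x0 :: xs).eraseIdx xi.2)    -- best(lst[:i] + lst[i+1:])
        let w := if PySem.Int.bitLength xi.1 = 0 then 1 else PySem.Int.bitLength xi.1
        let cand := ((xi.1 <<< sub.2) + sub.1, sub.2 + w)
        match res with
        | none => some cand
        | some r => if cand.1 > r.1 then some cand else some r) none).getD (0, 0))

def maxGoodNumber_alt (nums : List Int) : Int := (pvBest nums.length nums).1

-- ===== PRECONDITION & SPEC =====
-- Pre_: exactly where A returns — int('', 2) raises ValueError on the empty list, and a
-- negative x makes bin(x)[2:] carry a 'b'/'-' so int(s, 2) raises ValueError as well.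
def Pre_maxGoodNumber (nums : List Int) : Prop := nums ≠ [] ∧ ∀ x ∈ nums, 0 ≤ x
instance (nums : List Int) : Decidable (Pre_maxGoodNumber nums) := by
  unfold Pre_maxGoodNumber; infer_instance
def pvWitness_maxGoodNumber : List Int := [3, 1]

def Spec_maxGoodNumber (nums : List Int) (out : Int) : Prop := out = maxGoodNumber_alt nums
instance (nums : List Int) (out : Int) : Decidable (Spec_maxGoodNumber nums out) := by
  unfold Spec_maxGoodNumber; infer_instance

-- ===== CLAIM (what is proved, stated in full; the proofs are below) =====
def Claim_equal_maxGoodNumber : Prop := ∀ (nums : List Int), Dom_maxGoodNumber nums →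
  Pre_maxGoodNumber nums → Spec_maxGoodNumber nums (maxGoodNumber nums)

-- ===== LEMMAS AND PROOFS =====

-- bit width of bin(x)[2:] for 0 ≤ x (also Source B's `x.bit_length() or 1`)
def pvBits (x : Int) : Nat := if PySem.Int.bitLength x = 0 then 1 else PySem.Int.bitLength x
-- total width of the concatenation
def pvClen (l : List Int) : Nat := (l.map pvBits).sum
-- value of the concatenated binary string of l, in closed numeric form
def pvCval : List Int → Int
  | [] => 0
  | x :: r => x * 2 ^ pvClen r + pvCval r
-- the binary-parse fold with accumulator a
def pvVal2 (a : Int) (s : List Char) : Int :=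
  s.foldl (fun a c => 2 * a + (if c == '1' then 1 else 0)) a
-- reference binary digit string of a Nat
def pvBd (n : Nat) : List Char :=
  if _h : n < 2 then [n.digitChar] else pvBd (n / 2) ++ [(n % 2).digitChar]
decreasing_by exact Nat.div_lt_self (by omega) (by omega)
-- A's maximum, as a fold of pvCval over the permutations
def pvMf (l : List Int) : Int :=
  (PySem.List.permutations l l.length).foldl (fun mv p => max mv (pvCval p)) 0

theorem pvTDC (fuel : Nat) : ∀ (n : Nat) (ds : List Char), n < fuel →
    Nat.toDigitsCore 2 fuel n ds = pvBd n ++ ds := by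
  induction fuel with
  | zero => intro n ds h; omega
  | succ fuel ih =>
    intro n ds h
    rw [Nat.toDigitsCore]
    by_cases h2 : n / 2 = 0
    · simp only [h2, if_pos]
      rw [pvBd]
      have hn2 : n < 2 := by omega
      rw [dif_pos hn2]
      have : n % 2 = n := Nat.mod_eq_of_lt hn2
      rw [this]
      rfl
    · simp only [h2]
      rw [ih (n / 2) _ (by omega)]
      have hn2 : ¬ n < 2 := by omega
      conv_rhs => rw [pvBd]
      rw [dif_neg hn2]
      simp

theorem pvToDigits_eq (n : Nat) : Nat.toDigits 2 n = pvBd n := by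
  rw [Nat.toDigits, pvTDC (n + 1) n [] (by omega)]
  simp

theorem pvBd_ne_nil (n : Nat) : pvBd n ≠ [] := by
  rw [pvBd]
  split <;> simp

theorem pvBd_bits (n : Nat) : ∀ c ∈ pvBd n, c = '0' ∨ c = '1' := by
  induction n using Nat.strong_induction_on with
  | _ n ih =>
    rw [pvBd]
    split
    · rename_i h
      intro c hc
      simp only [List.mem_singleton] at hc
      subst hc
      interval_cases n
      · left; rfl
      · right; rfl
    · rename_i h
      intro c hc
      rw [List.mem_append] at hc
      rcases hc with hc | hc
      · exact ih (n / 2) (Nat.div_lt_self (by omega) (by omega)) c hc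
      · simp only [List.mem_singleton] at hc
        subst hc
        rcases Nat.mod_two_eq_zero_or_one n with h0 | h0 <;> rw [h0]
        · left; rfl
        · right; rfl

theorem pvBitLength_ne_zero (m : Nat) (hm : 0 < m) : PySem.Int.bitLength (m : Int) ≠ 0 := by
  rw [PySem.Int.bitLength_natCast hm]
  omega

theorem pvBd_length (n : Nat) : (pvBd n).length = pvBits (n : Int) := by
  induction n using Nat.strong_induction_on with
  | _ n ih =>
    rw [pvBd]
    split
    · rename_i h
      interval_cases n <;> decide
    · rename_i h
      have h2 : 0 < n := by omega
      have h3 : 0 < n / 2 := by omega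
      simp only [List.length_append, List.length_singleton]
      rw [ih (n / 2) (Nat.div_lt_self (by omega) (by omega))]
      unfold pvBits
      rw [if_neg (pvBitLength_ne_zero _ h2), if_neg (pvBitLength_ne_zero _ h3)]
      rw [PySem.Int.bitLength_natCast h2]

theorem pvVal2_append (a : Int) (s t : List Char) :
    pvVal2 a (s ++ t) = pvVal2 (pvVal2 a s) t := by
  simp [pvVal2, List.foldl_append]

theorem pvVal2_pvBd (n : Nat) : ∀ a : Int,
    pvVal2 a (pvBd n) = a * 2 ^ (pvBd n).length + (n : Int) := by
  induction n using Nat.strong_induction_on with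
  | _ n ih =>
    intro a
    rw [pvBd]
    split
    · rename_i h
      interval_cases n <;> simp [pvVal2, Nat.digitChar] <;> ring
    · rename_i h
      rw [pvVal2_append]
      rw [ih (n / 2) (Nat.div_lt_self (by omega) (by omega))]
      simp only [List.length_append, List.length_singleton]
      have hd : pvVal2 (a * 2 ^ (pvBd (n / 2)).length + ((n / 2 : Nat) : Int)) [(n % 2).digitChar]
          = 2 * (a * 2 ^ (pvBd (n / 2)).length + ((n / 2 : Nat) : Int)) + ((n % 2 : Nat) : Int) := by
        rcases Nat.mod_two_eq_zero_or_one n with h0 | h0 <;> rw [h0] <;>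
          simp [pvVal2, Nat.digitChar]
      rw [hd, pow_succ]
      have hmod : ((n : Int)) = 2 * ((n / 2 : Nat) : Int) + ((n % 2 : Nat) : Int) := by omega
      rw [hmod]
      ring

theorem pvDigs_eq (x : Int) (hx : 0 ≤ x) :
    (PySem.Int.toBinChars0b x).drop 2 = pvBd x.toNat := by
  rw [PySem.Int.toBinChars0b]
  rw [if_neg (by omega)]
  simp [pvToDigits_eq]

theorem pvVal2_lin (s : List Char) : ∀ a : Int,
    pvVal2 a s = a * 2 ^ s.length + pvVal2 0 s := by
  induction s with
  | nil => intro a; simp [pvVal2]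
  | cons c t ih =>
    intro a
    show pvVal2 (2 * a + (if c == '1' then 1 else 0)) t =
      a * 2 ^ (c :: t).length + pvVal2 (2 * 0 + (if c == '1' then 1 else 0)) t
    rw [ih (2 * a + (if c == '1' then 1 else 0)), ih (2 * 0 + (if c == '1' then 1 else 0))]
    simp only [List.length_cons]
    rw [pow_succ]
    ring

theorem pvBits_toNat (x : Int) (hx : 0 ≤ x) : pvBits ((x.toNat : Nat) : Int) = pvBits x := by
  rw [Int.toNat_of_nonneg hx]

theorem pvCat (p : List Int) (hp : ∀ x ∈ p, 0 ≤ x) :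
    (p.flatMap (fun x => (PySem.Int.toBinChars0b x).drop 2)).length = pvClen p ∧
    pvVal2 0 (p.flatMap (fun x => (PySem.Int.toBinChars0b x).drop 2)) = pvCval p ∧
    (∀ c ∈ p.flatMap (fun x => (PySem.Int.toBinChars0b x).drop 2), c = '0' ∨ c = '1') ∧
    (p ≠ [] → p.flatMap (fun x => (PySem.Int.toBinChars0b x).drop 2) ≠ []) := by
  induction p with
  | nil => simp [pvClen, pvCval, pvVal2]
  | cons x p' ih =>
    have hx : 0 ≤ x := hp x List.mem_cons_self
    have hp' : ∀ y ∈ p', 0 ≤ y := fun y hy => hp y (List.mem_cons_of_mem x hy)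
    obtain ⟨ihl, ihv, ihc, _⟩ := ih hp'
    rw [List.flatMap_cons, pvDigs_eq x hx]
    have hlen : (pvBd x.toNat).length = pvBits x := by
      rw [pvBd_length, pvBits_toNat x hx]
    refine ⟨?_, ?_, ?_, ?_⟩
    · simp [pvClen, hlen, ihl]
    · rw [pvVal2_append]
      have h1 : pvVal2 0 (pvBd x.toNat) = x := by
        rw [pvVal2_pvBd x.toNat 0, Int.toNat_of_nonneg hx]
        ring
      rw [h1, pvVal2_lin, ihl, ihv]
      show x * 2 ^ pvClen p' + pvCval p' = pvCval (x :: p')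
      rfl
    · intro c hc
      rw [List.mem_append] at hc
      rcases hc with hc | hc
      · exact pvBd_bits x.toNat c hc
      · exact ihc c hc
    · intro _
      simp [pvBd_ne_nil x.toNat]

theorem pvParse (p : List Int) (hp : ∀ x ∈ p, 0 ≤ x) (hne : p ≠ []) :
    pvParse2? (p.flatMap (fun x => (PySem.Int.toBinChars0b x).drop 2)) = some (pvCval p) := by
  obtain ⟨_, hv, hc, hn⟩ := pvCat p hp
  rw [pvParse2?, if_pos]
  · rw [← hv]; rfl
  · refine ⟨hn hne, ?_⟩
    rw [List.all_eq_true]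
    intro c hcm
    rcases hc c hcm with h | h <;> simp [h]

theorem pvCval_nonneg (p : List Int) (hp : ∀ x ∈ p, 0 ≤ x) : 0 ≤ pvCval p := by
  induction p with
  | nil => simp [pvCval]
  | cons x r ih =>
    have hx : 0 ≤ x := hp x List.mem_cons_self
    have := ih (fun y hy => hp y (List.mem_cons_of_mem x hy))
    show 0 ≤ x * 2 ^ pvClen r + pvCval r
    have : (0:Int) ≤ x * 2 ^ pvClen r := mul_nonneg hx (by positivity)
    omega

theorem pvClen_perm {q r : List Int} (h : q.Perm r) : pvClen q = pvClen r := by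
  exact List.Perm.sum_eq (h.map pvBits)

theorem pvClen_erase (l : List Int) (i : Nat) (h : i < l.length) :
    pvClen l = pvBits l[i] + pvClen (l.eraseIdx i) := by
  have hp : (l[i] :: l.eraseIdx i).Perm l := List.getElem_cons_eraseIdx_perm h
  rw [pvClen_perm hp.symm]
  rfl

theorem pvFM0 {α : Type} (v : α → Int) (s : List α) : ∀ (m₁ m₂ : Int),
    s.foldl (fun a q => max a (v q)) (max m₁ m₂) =
      max m₁ (s.foldl (fun a q => max a (v q)) m₂) := by
  induction s with
  | nil => intro m₁ m₂; rfl
  | cons q t ih =>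
    intro m₁ m₂
    show t.foldl (fun a q => max a (v q)) (max (max m₁ m₂) (v q)) =
      max m₁ (t.foldl (fun a q => max a (v q)) (max m₂ (v q)))
    rw [max_assoc, ih m₁ (max m₂ (v q))]

theorem pvFMAX {α : Type} (v : α → Int) (s : List α) (m : Int)
    (hv : ∀ q ∈ s, 0 ≤ v q) (hs : s ≠ []) :
    s.foldl (fun a q => max a (v q)) m = max m (s.foldl (fun a q => max a (v q)) 0) := by
  cases s with
  | nil => exact absurd rfl hs
  | cons q t =>
    show t.foldl (fun a q => max a (v q)) (max m (v q)) =
      max m (t.foldl (fun a q => max a (v q)) (max 0 (v q)))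
    have h1 : max m (v q) = max m (max 0 (v q)) := by
      have := hv q List.mem_cons_self
      omega
    rw [h1, pvFM0]

theorem pvADD {α : Type} (v : α → Int) (c : Int) (s : List α) : ∀ m : Int,
    s.foldl (fun a q => max a (c + v q)) (c + m) = c + s.foldl (fun a q => max a (v q)) m := by
  induction s with
  | nil => intro m; rfl
  | cons q t ih =>
    intro m
    show t.foldl (fun a q => max a (c + v q)) (max (c + m) (c + v q)) =
      c + t.foldl (fun a q => max a (v q)) (max m (v q))
    have : max (c + m) (c + v q) = c + max m (v q) := by omega
    rw [this, ih]

theorem pvADD0 {α : Type} (v : α → Int) (c : Int) (s : List α)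
    (hv : ∀ q ∈ s, 0 ≤ v q) (hc : 0 ≤ c) (hs : s ≠ []) :
    s.foldl (fun a q => max a (c + v q)) 0 = c + s.foldl (fun a q => max a (v q)) 0 := by
  cases s with
  | nil => exact absurd rfl hs
  | cons q t =>
    show t.foldl (fun a q => max a (c + v q)) (max 0 (c + v q)) =
      c + t.foldl (fun a q => max a (v q)) (max 0 (v q))
    have hq := hv q List.mem_cons_self
    have h1 : max 0 (c + v q) = c + max 0 (v q) := by omega
    rw [h1, pvADD]

theorem pvPNE (n : Nat) : ∀ l : List Int, l.length = n → PySem.List.permutations l n ≠ [] := by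
  induction n with
  | zero =>
    intro l hl
    rw [PySem.List.permutations_zero]
    simp
  | succ n ih =>
    intro l hl
    cases l with
    | nil => simp at hl
    | cons x xs =>
      rw [PySem.List.permutations_succ]
      intro hcon
      rw [List.flatMap_eq_nil_iff] at hcon
      have h0 : 0 ∈ List.range (x :: xs).length := by
        rw [List.mem_range]
        simp
      have := hcon 0 h0
      simp only [List.getElem?_cons_zero] at this
      rw [List.map_eq_nil_iff] at this
      exact ih xs (by simpa using hl) (by simpa using this)

theorem pvZipIdx (l : List Int) : ∀ k : Nat,
    l.zipIdx k = (List.range l.length).map (fun i => (l.getD i 0, k + i)) := by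
  induction l with
  | nil => intro k; rfl
  | cons x xs ih =>
    intro k
    rw [List.zipIdx_cons, ih (k + 1)]
    show (x, k) :: _ = (List.range (xs.length + 1)).map _
    rw [List.range_succ_eq_map, List.map_cons, List.map_map]
    refine congrArg₂ _ (by simp) ?_
    apply List.map_congr_left
    intro i _
    simp [Function.comp]
    omega

theorem pvOPT {β : Type} (candf : β → Int × Nat) (K : Nat) :
    ∀ (ps : List β), (∀ p ∈ ps, (candf p).2 = K) → ∀ m : Int,
    ps.foldl (fun res p =>
        match res with
        | none => some (candf p)
        | some r => if (candf p).1 > r.1 then some (candf p) else some r) (some (m, K)) =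
      some (ps.foldl (fun a p => max a ((candf p).1)) m, K) := by
  intro ps
  induction ps with
  | nil => intro _ m; rfl
  | cons p t ih =>
    intro hc m
    have hcp : candf p = ((candf p).1, K) := by
      rw [← hc p List.mem_cons_self]
    have hct : ∀ q ∈ t, (candf q).2 = K := fun q hq => hc q (List.mem_cons_of_mem p hq)
    show t.foldl _ (if (candf p).1 > m then some (candf p) else some (m, K)) =
      some (t.foldl (fun a p => max a ((candf p).1)) (max m (candf p).1), K)
    by_cases hgt : (candf p).1 > m
    · rw [if_pos hgt, hcp, ih hct, max_eq_right (le_of_lt hgt)]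
    · rw [if_neg hgt, ih hct, max_eq_left (by omega)]

theorem pvOPTN {β : Type} (candf : β → Int × Nat) (K : Nat) (p : β) (t : List β)
    (hc : ∀ q ∈ p :: t, (candf q).2 = K) (h0 : 0 ≤ (candf p).1) :
    (p :: t).foldl (fun res q =>
        match res with
        | none => some (candf q)
        | some r => if (candf q).1 > r.1 then some (candf q) else some r) none =
      some ((p :: t).foldl (fun a q => max a ((candf q).1)) 0, K) := by
  rw [List.foldl_cons, List.foldl_cons]
  show t.foldl _ (some (candf p)) = _
  have hcp : (some (candf p) : Option (Int × Nat)) = some ((candf p).1, K) := by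
    rw [← hc p List.mem_cons_self]
  rw [hcp, pvOPT candf K t (fun q hq => hc q (List.mem_cons_of_mem p hq)) ((candf p).1),
    max_eq_right h0]

def pvCandf (L : List Int) (i : Nat) : Int × Nat :=
  (L.getD i 0 * 2 ^ pvClen (L.eraseIdx i) + pvMf (L.eraseIdx i), pvClen L)

theorem pvMf_nonneg (l : List Int) : 0 ≤ pvMf l := by
  exact (PySem.List.le_foldl_max_int (PySem.List.permutations l l.length) pvCval 0).1

theorem pvMF (n : Nat) (l : List Int) (hl : l.length = n + 1) (hp : ∀ x ∈ l, 0 ≤ x) :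
    pvMf l = (List.range (n + 1)).foldl
      (fun mv i => max mv (l.getD i 0 * 2 ^ pvClen (l.eraseIdx i) + pvMf (l.eraseIdx i))) 0 := by
  unfold pvMf
  rw [hl, PySem.List.permutations_succ, List.foldl_flatMap]
  rw [hl]
  apply PySem.List.foldl_congr_mem
  intro acc i hi
  have hi' : i < l.length := by rw [hl]; exact List.mem_range.mp hi
  rw [List.getElem?_eq_getElem hi']
  show List.foldl _ acc (List.map (fun p => l[i] :: p) (PySem.List.permutations (l.eraseIdx i) n)) = _
  rw [List.foldl_map]
  have hlen : (l.eraseIdx i).length = n := by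
    rw [List.length_eraseIdx, if_pos hi', hl]
    omega
  have hsub : ∀ y ∈ l.eraseIdx i, 0 ≤ y := fun y hy => hp y (List.mem_of_mem_eraseIdx hy)
  have hqq : ∀ q ∈ PySem.List.permutations (l.eraseIdx i) n, q.Perm (l.eraseIdx i) := by
    intro q hq
    apply PySem.List.perm_of_mem_permutations
    rwa [hlen]
  have hstep : ∀ (acc : Int), ∀ q ∈ PySem.List.permutations (l.eraseIdx i) n,
      max acc (pvCval (l[i] :: q)) =
        max acc (l[i] * 2 ^ pvClen (l.eraseIdx i) + pvCval q) := by
    intro acc q hq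
    show max acc (l[i] * 2 ^ pvClen q + pvCval q) = _
    rw [pvClen_perm (hqq q hq)]
  rw [PySem.List.foldl_congr_mem _ _ _ acc hstep]
  have hvq : ∀ q ∈ PySem.List.permutations (l.eraseIdx i) n,
      0 ≤ l[i] * 2 ^ pvClen (l.eraseIdx i) + pvCval q := by
    intro q hq
    have h1 : 0 ≤ l[i] * 2 ^ pvClen (l.eraseIdx i) :=
      mul_nonneg (hp l[i] (List.getElem_mem hi')) (by positivity)
    have h2 : 0 ≤ pvCval q := pvCval_nonneg q (fun y hy => hsub y ((hqq q hq).mem_iff.mp hy))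
    omega
  rw [pvFMAX _ _ acc hvq (pvPNE n (l.eraseIdx i) hlen)]
  rw [pvADD0 pvCval (l[i] * 2 ^ pvClen (l.eraseIdx i)) _
      (fun q hq => pvCval_nonneg q (fun y hy => hsub y ((hqq q hq).mem_iff.mp hy)))
      (mul_nonneg (hp l[i] (List.getElem_mem hi')) (by positivity))
      (pvPNE n (l.eraseIdx i) hlen)]
  rw [List.getD_eq_getElem l 0 hi', hlen]

theorem pvMAIN (n : Nat) : ∀ l : List Int, l.length = n → (∀ x ∈ l, 0 ≤ x) →
    pvBest n l = (pvMf l, pvClen l) := by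
  induction n with
  | zero =>
    intro l hl _
    rw [List.length_eq_zero_iff] at hl
    subst hl
    decide
  | succ n ih =>
    intro l hl hp
    cases l with
    | nil => simp at hl
    | cons x0 xs =>
      have hlen : ∀ i, i < (x0 :: xs).length → (((x0 :: xs).eraseIdx i).length = n) := by
        intro i hi
        rw [List.length_eraseIdx, if_pos hi, hl]
        omega
      have hsub : ∀ i, ∀ y ∈ (x0 :: xs).eraseIdx i, 0 ≤ y :=
        fun i y hy => hp y (List.mem_of_mem_eraseIdx hy)
      show (((x0 :: xs).zipIdx.foldl _ none).getD (0, 0)) = _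
      rw [pvZipIdx (x0 :: xs) 0, List.foldl_map]
      set L := x0 :: xs with hL
      have hlL : L.length = n + 1 := hl
      have hcongr : ∀ (res : Option (Int × Nat)), ∀ i ∈ List.range L.length,
          (fun (res : Option (Int × Nat)) (xi : Int × Nat) =>
            let sub := pvBest n (L.eraseIdx xi.2)
            let w := if PySem.Int.bitLength xi.1 = 0 then 1 else PySem.Int.bitLength xi.1
            let cand := ((xi.1 <<< sub.2) + sub.1, sub.2 + w)
            match res with
            | none => some cand
            | some r => if cand.1 > r.1 then some cand else some r) res (L.getD i 0, 0 + i) =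
          (fun res i =>
            match res with
            | none => some (pvCandf L i)
            | some r => if (pvCandf L i).1 > r.1 then some (pvCandf L i) else some r) res i := by
        intro res i hi
        have hi' : i < L.length := List.mem_range.mp hi
        have hbd := ih (L.eraseIdx i) (hlen i hi') (hsub i)
        simp only [zero_add]
        rw [hbd]
        have hg : L.getD i 0 = L[i] := List.getD_eq_getElem L 0 hi'
        have hcl : pvClen (L.eraseIdx i) + pvBits (L.getD i 0) = pvClen L := by
          rw [hg, pvClen_erase L i hi']
          omega
        show (let cand := ((L.getD i 0 <<< pvClen (L.eraseIdx i)) + pvMf (L.eraseIdx i),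
                pvClen (L.eraseIdx i) +
                  (if PySem.Int.bitLength (L.getD i 0) = 0 then 1
                   else PySem.Int.bitLength (L.getD i 0)))
              match res with
              | none => some cand
              | some r => if cand.1 > r.1 then some cand else some r) = _
        rw [show ((if PySem.Int.bitLength (L.getD i 0) = 0 then 1
            else PySem.Int.bitLength (L.getD i 0))) = pvBits (L.getD i 0) from rfl]
        rw [Int.shiftLeft_eq, hcl]
        rfl
      rw [PySem.List.foldl_congr_mem _ _ _ none hcongr]
      have hrange : List.range L.length = 0 :: List.map Nat.succ (List.range n) := by
        rw [hlL, List.range_succ_eq_map]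
      rw [hrange]
      have hK : ∀ q ∈ (0 :: List.map Nat.succ (List.range n)), (pvCandf L q).2 = pvClen L :=
        fun _ _ => rfl
      have h0 : 0 ≤ (pvCandf L 0).1 := by
        have h0' : (0 : Nat) < L.length := by omega
        have h1 : 0 ≤ L.getD 0 0 * 2 ^ pvClen (L.eraseIdx 0) := by
          rw [List.getD_eq_getElem L 0 h0']
          exact mul_nonneg (hp _ (List.getElem_mem h0')) (by positivity)
        have h2 : 0 ≤ pvMf (L.eraseIdx 0) := pvMf_nonneg _
        show 0 ≤ L.getD 0 0 * 2 ^ pvClen (L.eraseIdx 0) + pvMf (L.eraseIdx 0)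
        omega
      rw [pvOPTN (pvCandf L) (pvClen L) 0 (List.map Nat.succ (List.range n)) hK h0]
      rw [Option.getD_some]
      refine Prod.ext ?_ rfl
      show (0 :: List.map Nat.succ (List.range n)).foldl
          (fun a q => max a ((pvCandf L q).1)) 0 = pvMf L
      rw [pvMF n L hlL hp, List.range_succ_eq_map]
      simp only [pvCandf]

theorem pvA_eq (nums : List Int) (h : Pre_maxGoodNumber nums) :
    maxGoodNumber nums = pvMf nums := by
  unfold maxGoodNumber pvMf
  apply PySem.List.foldl_congr_mem
  intro acc p hpm
  have h1 : p.Perm nums := PySem.List.perm_of_mem_permutations hpm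
  have hpnn : ∀ x ∈ p, 0 ≤ x := fun x hx => h.2 x (h1.subset hx)
  have hpne : p ≠ [] := by
    intro he
    subst he
    exact h.1 h1.symm.eq_nil
  show (if (pvParse2? (p.flatMap (fun x => (PySem.Int.toBinChars0b x).drop 2))).getD 0 > acc
        then (pvParse2? (p.flatMap (fun x => (PySem.Int.toBinChars0b x).drop 2))).getD 0
        else acc) = max acc (pvCval p)
  rw [pvParse p hpnn hpne]
  simp only [Option.getD_some]
  split <;> omega

-- ===== VERDICT (by name: the statement is the Claim_ definition above) =====
theorem maxGoodNumber_spec : Claim_equal_maxGoodNumber := by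
  intro nums _ h
  unfold Spec_maxGoodNumber maxGoodNumber_alt
  rw [pvA_eq nums h, pvMAIN nums.length nums rfl h.2]
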